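-- pv_equiv track=rewrite | github.com/neddul/advent-of-code | 2023/1112/cosmicexpansion.py | distance_to_other_galaxies
-- ===== SOURCE A (Python) =====
-- def distance_to_other_galaxies(my_galaxy_locations):
--     cumsum = 0
--     for i in range(len(my_galaxy_locations)):
--         g = my_galaxy_locations[i]
--         for other_locations in my_galaxy_locations[i:]:
--             distance = abs(g[0] - other_locations[0]) + abs(g[1] - other_locations[1])
--             cumsum+=distance
--     return cumsum
-- ===== SOURCE B (Python) =====
-- def distance_to_other_galaxies(my_galaxy_locations):
--     def axis_sum(coords):
--         coords = sorted(coords)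
--         n = len(coords)
--         total = 0
--         for k, c in enumerate(coords):
--             total += (2 * k - (n - 1)) * c
--         return total
--     return (axis_sum([g[0] for g in my_galaxy_locations])
--             + axis_sum([g[1] for g in my_galaxy_locations]))
-- ===== Notes on version B (the rewrite author's own statement) =====
-- stated objective: faster
-- what changed: Replaces the O(n^2) all-pairs double loop by sorting each coordinate axis and summing each sorted coordinate weighted by (2k-(n-1)), the closed form of the sum of pairwise absolute differences.
import Mathlib
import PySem

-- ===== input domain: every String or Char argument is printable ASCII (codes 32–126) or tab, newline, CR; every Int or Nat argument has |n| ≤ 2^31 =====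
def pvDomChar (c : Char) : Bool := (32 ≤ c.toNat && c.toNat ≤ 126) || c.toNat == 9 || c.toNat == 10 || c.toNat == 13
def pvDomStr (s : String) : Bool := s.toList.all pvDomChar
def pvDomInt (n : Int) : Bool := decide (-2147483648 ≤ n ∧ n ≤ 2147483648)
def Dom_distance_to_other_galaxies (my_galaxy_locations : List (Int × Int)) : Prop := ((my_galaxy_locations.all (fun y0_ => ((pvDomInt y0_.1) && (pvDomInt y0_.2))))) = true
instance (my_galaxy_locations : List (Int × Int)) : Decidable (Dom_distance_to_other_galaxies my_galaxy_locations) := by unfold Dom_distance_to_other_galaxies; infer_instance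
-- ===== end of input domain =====

-- B replaces A's O(n^2) all-pairs double loop by a per-axis sort plus weighted sum (objective: faster).

-- ===== PORT A =====
def distance_to_other_galaxies (my_galaxy_locations : List (Int × Int)) : Int :=
  (PySem.List.pyRange 0 my_galaxy_locations.length 1).foldl
    (fun cumsum i =>
      let g := PySem.List.pyGetD my_galaxy_locations i (0, 0)
      (PySem.List.slice my_galaxy_locations (some i) none).foldl
        (fun c other_locations =>
          c + (|g.1 - other_locations.1| + |g.2 - other_locations.2|)) cumsum)
    0

-- ===== PORT B =====
def axisSum (coords : List Int) : Int :=
  let s := PySem.List.sorted coords (fun x => x) false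
  let n : Int := s.length
  (PySem.List.enumerate s 0).foldl
    (fun total kc => total + (2 * kc.1 - (n - 1)) * kc.2) 0

def distance_to_other_galaxies_alt (my_galaxy_locations : List (Int × Int)) : Int :=
  axisSum (my_galaxy_locations.map (·.1)) + axisSum (my_galaxy_locations.map (·.2))

-- ===== PRECONDITION & SPEC =====
def Spec_distance_to_other_galaxies (my_galaxy_locations : List (Int × Int)) (out : Int) : Prop := out = distance_to_other_galaxies_alt my_galaxy_locations
instance (my_galaxy_locations : List (Int × Int)) (out : Int) : Decidable (Spec_distance_to_other_galaxies my_galaxy_locations out) := by unfold Spec_distance_to_other_galaxies; infer_instance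

-- ===== CLAIM (what is proved, stated in full; the proofs are below) =====
def Claim_equal_distance_to_other_galaxies : Prop := ∀ (my_galaxy_locations : List (Int × Int)), Dom_distance_to_other_galaxies my_galaxy_locations → Spec_distance_to_other_galaxies my_galaxy_locations (distance_to_other_galaxies my_galaxy_locations)

-- ===== LEMMAS AND PROOFS =====

-- Sum of distances of g to every element of a pair list
def rowSum (g : Int × Int) (l : List (Int × Int)) : Int :=
  (l.map (fun o => |g.1 - o.1| + |g.2 - o.2|)).sum

-- A's double loop, as structural recursion: pairwise sum over suffixes
def Qd : List (Int × Int) → Int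
  | [] => 0
  | g :: t => rowSum g (g :: t) + Qd t

-- per-axis pairwise sum over suffixes
def Q : List Int → Int
  | [] => 0
  | a :: t => ((a :: t).map (fun b => |a - b|)).sum + Q t

-- full ordered-pairs double sum of |a - b|, with the two lists separated
def T2 (xs ys : List Int) : Int :=
  (xs.map (fun a => (ys.map (fun b => |a - b|)).sum)).sum

-- B's weighted sum with explicit start index c and total count n
def E (s : List Int) (c n : Int) : Int :=
  ((PySem.List.enumerate s c).map (fun kc => (2 * kc.1 - (n - 1)) * kc.2)).sum

theorem sub_const_sum (t : List Int) (a : Int) :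
    (t.map (fun b => b - a)).sum = t.sum - (t.length : Int) * a := by
  induction t with
  | nil => simp
  | cons x t ih => simp only [List.map_cons, List.sum_cons, List.length_cons, ih]; push_cast; ring

theorem loopNat (l : List (Int × Int)) (acc : Int) :
    (List.range l.length).foldl
      (fun c k => c + rowSum (l.getD k (0, 0)) (l.drop k)) acc = acc + Qd l := by
  induction l generalizing acc with
  | nil => simp [Qd]
  | cons g t ih =>
      rw [List.length_cons, List.range_succ_eq_map]
      simp only [List.foldl_cons, List.foldl_map, List.getD_cons_succ, List.drop_succ_cons,
        List.getD_cons_zero, List.drop_zero, Nat.succ_eq_add_one]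
      rw [ih]
      simp [Qd]; ring

theorem A_eq_Qd (l : List (Int × Int)) : distance_to_other_galaxies l = Qd l := by
  simp only [distance_to_other_galaxies, PySem.List.pyRange_zero_natCast, List.foldl_map,
    PySem.List.pyGetD_natCast, PySem.List.slice_from_natCast, PySem.List.foldl_add]
  simpa only [rowSum, PySem.List.foldl_add, zero_add] using loopNat l 0

theorem Qd_split (l : List (Int × Int)) :
    Qd l = Q (l.map (·.1)) + Q (l.map (·.2)) := by
  induction l with
  | nil => simp [Qd, Q]
  | cons g t ih =>
      simp only [Qd, Q, rowSum, List.map_cons, List.map_map, ih]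
      simp only [PySem.List.sum_map_add_int, Function.comp_def, List.sum_cons]
      ring

theorem T2_cons_right (xs t : List Int) (a : Int) :
    T2 xs (a :: t) = (xs.map (fun x => |x - a|)).sum + T2 xs t := by
  simp only [T2, List.map_cons, List.sum_cons]
  rw [show (fun x => |x - a| + (t.map (fun b => |x - b|)).sum)
        = (fun x => (fun y => |y - a|) x + (fun y => (t.map (fun b => |y - b|)).sum) x) from rfl,
    PySem.List.sum_map_add_int]

theorem T2_cons_left (a : Int) (t ys : List Int) :
    T2 (a :: t) ys = (ys.map (fun b => |a - b|)).sum + T2 t ys := by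
  simp [T2]

theorem two_Q_eq_T2 (xs : List Int) : 2 * Q xs = T2 xs xs := by
  induction xs with
  | nil => simp [Q, T2]
  | cons a t ih =>
      have hsym : (t.map (fun x => |x - a|)).sum = (t.map (fun b => |a - b|)).sum :=
        congrArg List.sum (List.map_congr_left (fun x _ => abs_sub_comm x a))
      rw [show Q (a :: t) = ((a :: t).map (fun b => |a - b|)).sum + Q t from rfl,
        T2_cons_right, T2_cons_left, ← ih]
      simp only [List.map_cons, List.sum_cons, sub_self, abs_zero, hsym]
      ring

theorem T2_perm {xs ys : List Int} (h : xs.Perm ys) : T2 xs xs = T2 ys ys := by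
  have hfun : ∀ x : Int, (xs.map (fun b => |x - b|)).sum = (ys.map (fun b => |x - b|)).sum :=
    fun x => (h.map _).sum_eq
  calc T2 xs xs = T2 xs ys := by
        unfold T2; exact congrArg List.sum (List.map_congr_left (fun x _ => hfun x))
    _ = T2 ys ys := by unfold T2; exact (h.map _).sum_eq

theorem Q_perm {xs ys : List Int} (h : xs.Perm ys) : Q xs = Q ys := by
  have h2 := two_Q_eq_T2 xs
  rw [T2_perm h, ← two_Q_eq_T2 ys] at h2
  omega

theorem E_shift (s : List Int) (c n : Int) : E s c n = E s c (n + 1) + s.sum := by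
  induction s generalizing c with
  | nil => simp [E, PySem.List.enumerate_nil]
  | cons a t ih =>
      simp only [E, PySem.List.enumerate_cons, List.map_cons, List.sum_cons, List.sum_cons] at *
      rw [ih (c + 1)]
      ring

theorem Q_sorted_eq_E (s : List Int) (hs : s.Pairwise (· ≤ ·)) (c : Int) :
    Q s = E s c ((s.length : Int) + 2 * c) := by
  induction s generalizing c with
  | nil => simp [Q, E, PySem.List.enumerate_nil]
  | cons a t ih =>
      rcases List.pairwise_cons.mp hs with ⟨hle, ht⟩
      have habs : (t.map (fun b => |a - b|)).sum = (t.map (fun b => b - a)).sum := by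
        apply congrArg List.sum
        exact List.map_congr_left (fun b hb => by
          rw [abs_sub_comm, abs_of_nonneg (by linarith [hle b hb])])
      have hE : E (a :: t) c ((↑(a :: t).length : Int) + 2 * c)
          = (2 * c - ((↑(a :: t).length + 2 * c) - 1)) * a
            + E t (c + 1) ((↑(a :: t).length : Int) + 2 * c) := by
        simp [E, PySem.List.enumerate_cons]
      have hshift : E t (c + 1) ((↑(a :: t).length : Int) + 2 * c)
          = E t (c + 1) ((↑t.length : Int) + 2 * (c + 1)) + t.sum := by
        have := E_shift t (c + 1) ((↑(a :: t).length : Int) + 2 * c)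
        rw [this]
        congr 1
        push_cast [List.length_cons]
        ring_nf
      rw [hE, hshift, ← ih ht (c + 1)]
      simp only [Q, List.map_cons, List.sum_cons, habs, sub_const_sum, sub_self, abs_zero,
        List.length_cons]
      push_cast
      ring

theorem Q_eq_axisSum (xs : List Int) : Q xs = axisSum xs := by
  unfold axisSum
  simp only [PySem.List.foldl_add]
  have hperm := PySem.List.sorted_perm xs (fun x => x) false
  rw [Q_perm hperm.symm, Q_sorted_eq_E _ (PySem.List.sorted_pairwise xs (fun x => x)) 0]
  simp [E]

-- ===== VERDICT (by name: the statement is the Claim_ definition above) =====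
theorem distance_to_other_galaxies_spec : Claim_equal_distance_to_other_galaxies := by
  intro l _
  show _ = _
  rw [A_eq_Qd, Qd_split, Q_eq_axisSum, Q_eq_axisSum]
  rfl
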